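-- pv_equiv track=rewrite | github.com/linhdvu14/cp-sols | sols/CodeForces/1807_d4/F_Bouncy_Ball.py | solve
-- ===== SOURCE A (Python) =====
-- DIR = {
--     'DR': (1, 1),
--     'DL': (1, -1),
--     'UR': (-1, 1),
--     'UL': (-1, -1),
-- }
--
-- def solve(R, C, r1, c1, r2, c2, d):
--     def can_reach(r1, c1, r2, c2, dr, dc):
--         nr = (r2 - r1) // dr
--         nc = (c2 - c1) // dc
--         return nr >= 0 and nc >= 0 and nr == nc
--
--     def bounce(r1, c1, dr, dc):
--         nr = R - 1 - r1 if dr == 1 else r1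
--         nc = C - 1 - c1 if dc == 1 else c1
--         n = min(nr, nc)
--         r2 = r1 + n * dr
--         c2 = c1 + n * dc
--         if n == nr: dr = -dr
--         if n == nc: dc = -dc
--         return r2, c2, dr, dc
--
--     r1 -= 1; c1 -= 1; r2 -= 1; c2 -= 1
--     dr, dc = DIR[d]
--
--     res = 0
--     seen = set()
--     while True:
--         if can_reach(r1, c1, r2, c2, dr, dc): return res
--         r1, c1, dr, dc = bounce(r1, c1, dr, dc)
--         if (r1, c1, dr, dc) in seen: return -1
--         seen.add((r1, c1, dr, dc))
--         res += 1
-- ===== SOURCE B (Python) =====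
-- DIR = {
--     'DR': (1, 1),
--     'DL': (1, -1),
--     'UR': (-1, 1),
--     'UL': (-1, -1),
-- }
--
-- def solve(R, C, r1, c1, r2, c2, d):
--     dr, dc = DIR[d]
--     tr, tc = r2 - 1, c2 - 1
--
--     def hit(s):
--         # is the target on the diagonal ray ahead of s?
--         r, c, sr, sc = s
--         kr = (tr - r) * sr
--         kc = (tc - c) * sc
--         return kr >= 0 and kc >= 0 and kr == kc
--
--     def step(s):
--         # jump to the nearer wall and reflect off it
--         r, c, sr, sc = s
--         ar = R - 1 - r if sr > 0 else r
--         ac = C - 1 - c if sc > 0 else c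
--         n = ar if ar < ac else ac
--         return (r + n * sr, c + n * sc,
--                 -sr if ar <= ac else sr,
--                 -sc if ac <= ar else sc)
--
--     s0 = (r1 - 1, c1 - 1, dr, dc)
--     # Floyd's two-pointer cycle detection: find t >= 1 with orbit(t) == orbit(2t)
--     t = 1
--     tort = step(s0)
--     hare = step(step(s0))
--     while tort != hare:
--         tort = step(tort)
--         hare = step(step(hare))
--         t += 1
--     # first m with orbit(m) == orbit(m + t): every state occurs before index m + t
--     m = 0
--     x, y = s0, tort
--     while x != y:
--         x = step(x)
--         y = step(y)
--         m += 1
--     # first segment whose ray hits the target, scanned in bounce order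
--     cur, i = s0, 0
--     while i < m + t:
--         if hit(cur):
--             return i
--         cur = step(cur)
--         i += 1
--     return -1
-- ===== Notes on version B (the rewrite author's own statement) =====
-- stated objective: alternative
-- what changed: B replaces A's seen-set cycle detection by Floyd's two-pointer cycle finding in O(1) extra space (tortoise/hare to find a t with orbit(t)=orbit(2t), then the first m with orbit(m)=orbit(m+t), then one bounded rescan returning the first segment whose ray hits the target), and replaces the floor-division ray test by a multiplicative one. …
-- outside the precondition, e.g. on solve(0, 2, -5, -5, -5, -3, 'DL'): A returns 2, B does not finish within the time limit; on solve(-1, -1, 3, -6, 6, 1, 'UR'): A returns 1, B does not finish within the time limit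
import Mathlib
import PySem

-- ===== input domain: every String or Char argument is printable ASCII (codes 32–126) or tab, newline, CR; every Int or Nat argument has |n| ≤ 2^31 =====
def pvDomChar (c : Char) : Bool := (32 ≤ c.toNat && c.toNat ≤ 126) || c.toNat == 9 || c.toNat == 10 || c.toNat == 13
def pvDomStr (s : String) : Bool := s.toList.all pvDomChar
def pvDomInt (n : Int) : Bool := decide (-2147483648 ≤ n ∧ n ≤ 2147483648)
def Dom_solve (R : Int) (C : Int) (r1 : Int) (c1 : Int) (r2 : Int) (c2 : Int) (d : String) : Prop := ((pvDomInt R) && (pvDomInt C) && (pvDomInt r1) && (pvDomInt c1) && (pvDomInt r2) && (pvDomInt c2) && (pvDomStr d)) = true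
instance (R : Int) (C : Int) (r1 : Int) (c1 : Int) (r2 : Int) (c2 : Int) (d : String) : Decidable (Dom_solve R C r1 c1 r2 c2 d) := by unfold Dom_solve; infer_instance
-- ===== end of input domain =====

-- B replaces A's seen-set cycle detection by Floyd's O(1)-space two-pointer cycle finding plus one bounded rescan.

-- ===== PORT A =====
-- module constant DIR
def pyDIR : PySem.Dict String (Int × Int) :=
  PySem.Dict.ofList [("DR", (1, 1)), ("DL", (1, -1)), ("UR", (-1, 1)), ("UL", (-1, -1))]

-- can_reach(r1, c1, r2, c2, dr, dc)
def canReachA (r1 c1 r2 c2 dr dc : Int) : Bool :=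
  let nr := PySem.Int.floordiv (r2 - r1) dr
  let nc := PySem.Int.floordiv (c2 - c1) dc
  decide (nr ≥ 0) && decide (nc ≥ 0) && decide (nr = nc)

-- 'R - 1 - r1 if dr == 1 else r1' (helper extracted for both uses in bounce)
def nwall (L x dv : Int) : Int := if dv = 1 then L - 1 - x else x

-- bounce(r1, c1, dr, dc)
def bounceA (R C r1 c1 dr dc : Int) : Int × Int × Int × Int :=
  let nr := nwall R r1 dr
  let nc := nwall C c1 dc
  let n := min nr nc
  let r2 := r1 + n * dr
  let c2 := c1 + n * dc
  let dr' := if n = nr then -dr else dr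
  let dc' := if n = nc then -dc else dc
  (r2, c2, dr', dc')

-- fuel scaffolding for the 'while True' loops: an upper bound (plus slack) on the number of
-- distinct reachable bounce states after the first bounce (they stay in a box of side 2K+2)
def fuelBox (R C r c dr dc : Int) : Nat :=
  let k := (nwall R r dr).natAbs + (nwall C c dc).natAbs + R.natAbs + C.natAbs + 2
  (2 * k + 2) * (2 * k + 2) * 4 + 2

-- the 'while True' loop, fueled (fuel exhaustion = none; unreachable under Pre_solve)
def loopA (R C tr tc : Int) (fuel : Nat) (r c dr dc res : Int)
    (seen : PySem.Set (Int × Int × Int × Int)) : Option Int :=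
  match fuel with
  | 0 => none
  | f + 1 =>
    if canReachA r c tr tc dr dc then some res
    else
      let s := bounceA R C r c dr dc
      if s ∈ seen then some (-1)
      else loopA R C tr tc f s.1 s.2.1 s.2.2.1 s.2.2.2 (res + 1) (PySem.Set.add seen s)

def solve (R : Int) (C : Int) (r1 : Int) (c1 : Int) (r2 : Int) (c2 : Int) (d : String) : Int :=
  match pyDIR.get? d with
  | none => 0  -- KeyError in Python; excluded by Pre_solve
  | some (dr, dc) =>
    (loopA R C (r2 - 1) (c2 - 1) (fuelBox R C (r1 - 1) (c1 - 1) dr dc + 2) (r1 - 1) (c1 - 1)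
      dr dc 0 PySem.Set.empty).getD 0

-- ===== PORT B =====
-- Source B's step(s): jump to the nearer wall and reflect off it
def stepB (R C : Int) (s : Int × Int × Int × Int) : Int × Int × Int × Int :=
  let ar := if s.2.2.1 > 0 then R - 1 - s.1 else s.1
  let ac := if s.2.2.2 > 0 then C - 1 - s.2.1 else s.2.1
  let n := if ar < ac then ar else ac
  (s.1 + n * s.2.2.1, s.2.1 + n * s.2.2.2,
   if ar ≤ ac then -s.2.2.1 else s.2.2.1,
   if ac ≤ ar then -s.2.2.2 else s.2.2.2)

-- Source B's hit(s): is the target on the diagonal ray ahead of s?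
def hitB (tr tc : Int) (s : Int × Int × Int × Int) : Bool :=
  let kr := (tr - s.1) * s.2.2.1
  let kc := (tc - s.2.1) * s.2.2.2
  decide (kr ≥ 0) && decide (kc ≥ 0) && decide (kr = kc)

-- Source B's first while loop (Floyd), fueled
def floydB (R C : Int) (fuel : Nat) (t : Nat) (tort hare : Int × Int × Int × Int) :
    Option (Nat × (Int × Int × Int × Int)) :=
  match fuel with
  | 0 => none
  | f + 1 =>
    if tort = hare then some (t, tort)
    else floydB R C f (t + 1) (stepB R C tort) (stepB R C (stepB R C hare))

-- Source B's second while loop (first m with orbit(m) == orbit(m+t)), fueled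
def muB (R C : Int) (fuel : Nat) (m : Nat) (x y : Int × Int × Int × Int) : Option Nat :=
  match fuel with
  | 0 => none
  | f + 1 => if x = y then some m else muB R C f (m + 1) (stepB R C x) (stepB R C y)

-- Source B's final while loop: first segment whose ray hits the target (total: counts down k = m+t-i)
def scanB (R C tr tc : Int) (k : Nat) (i : Int) (cur : Int × Int × Int × Int) : Int :=
  match k with
  | 0 => -1
  | k + 1 => if hitB tr tc cur then i else scanB R C tr tc k (i + 1) (stepB R C cur)

def solve_alt (R : Int) (C : Int) (r1 : Int) (c1 : Int) (r2 : Int) (c2 : Int) (d : String) : Int :=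
  match pyDIR.get? d with
  | none => 0  -- KeyError in Python; excluded by Pre_solve
  | some (dr, dc) =>
    let s0 : Int × Int × Int × Int := (r1 - 1, c1 - 1, dr, dc)
    let fb := (fuelBox R C (r1 - 1) (c1 - 1) dr dc + 2) * (fuelBox R C (r1 - 1) (c1 - 1) dr dc + 2) + 2
    match floydB R C fb 1 (stepB R C s0) (stepB R C (stepB R C s0)) with
    | none => 0  -- fuel exhaustion, unreachable under Pre_solve
    | some (t, tort) =>
      match muB R C fb 0 s0 tort with
      | none => 0  -- fuel exhaustion, unreachable under Pre_solve
      | some m => scanB R C (r2 - 1) (c2 - 1) (m + t) 0 s0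

-- ===== PRECONDITION & SPEC =====
-- Pre_ keeps a valid direction key and positive grid dimensions (R,C ≥ 1): for R ≤ 0 or C ≤ 0 the
-- bounce orbit can escape to infinity — A usually loops forever there, and where it still returns
-- (the target happens to lie on a ray of the divergent orbit) B's cycle search diverges instead.
def Pre_solve (R : Int) (C : Int) (r1 : Int) (c1 : Int) (r2 : Int) (c2 : Int) (d : String) : Prop :=
  (d = "DR" ∨ d = "DL" ∨ d = "UR" ∨ d = "UL") ∧ 1 ≤ R ∧ 1 ≤ C
instance (R : Int) (C : Int) (r1 : Int) (c1 : Int) (r2 : Int) (c2 : Int) (d : String) : Decidable (Pre_solve R C r1 c1 r2 c2 d) := by unfold Pre_solve; infer_instance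

def pvWitness_solve : Int × Int × Int × Int × Int × Int × String := (3, 5, 1, 2, 3, 4, "DR")

def Spec_solve (R : Int) (C : Int) (r1 : Int) (c1 : Int) (r2 : Int) (c2 : Int) (d : String) (out : Int) : Prop := out = solve_alt R C r1 c1 r2 c2 d
instance (R : Int) (C : Int) (r1 : Int) (c1 : Int) (r2 : Int) (c2 : Int) (d : String) (out : Int) : Decidable (Spec_solve R C r1 c1 r2 c2 d out) := by unfold Spec_solve; infer_instance

-- ===== CLAIM (what is proved, stated in full; the proofs are below) =====
def Claim_equal_solve : Prop := ∀ (R : Int) (C : Int) (r1 : Int) (c1 : Int) (r2 : Int) (c2 : Int) (d : String), Dom_solve R C r1 c1 r2 c2 d → Pre_solve R C r1 c1 r2 c2 d → Spec_solve R C r1 c1 r2 c2 d (solve R C r1 c1 r2 c2 d)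

-- ===== LEMMAS AND PROOFS =====

-- the bounce map and the target test as functions of a whole state; the orbit of the start state
def stA (R C : Int) (s : Int × Int × Int × Int) : Int × Int × Int × Int :=
  bounceA R C s.1 s.2.1 s.2.2.1 s.2.2.2

def orb (R C : Int) (s : Int × Int × Int × Int) (n : Nat) : Int × Int × Int × Int :=
  (stA R C)^[n] s

def hitA (tr tc : Int) (s : Int × Int × Int × Int) : Bool :=
  canReachA s.1 s.2.1 tr tc s.2.2.1 s.2.2.2

def dirOK (s : Int × Int × Int × Int) : Prop :=
  (s.2.2.1 = 1 ∨ s.2.2.1 = -1) ∧ (s.2.2.2 = 1 ∨ s.2.2.2 = -1)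

-- states with wall distances in [0, K] (where the orbit lives after the first bounce)
def uvOK (R C K : Int) (s : Int × Int × Int × Int) : Prop :=
  dirOK s ∧ 0 ≤ nwall R s.1 s.2.2.1 ∧ nwall R s.1 s.2.2.1 ≤ K ∧
    0 ≤ nwall C s.2.1 s.2.2.2 ∧ nwall C s.2.1 s.2.2.2 ≤ K

lemma orb_zero (R C : Int) (s : Int × Int × Int × Int) : orb R C s 0 = s := rfl

lemma orb_succ (R C : Int) (s : Int × Int × Int × Int) (n : Nat) :
    orb R C s (n + 1) = stA R C (orb R C s n) := Function.iterate_succ_apply' _ _ _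

lemma fd_one (a : Int) : PySem.Int.floordiv a 1 = a := by
  have h := PySem.Int.floordiv_mul_add_mod a 1
  have h2 : 0 ≤ PySem.Int.mod a 1 := PySem.Int.mod_nonneg a (by norm_num)
  have h3 : PySem.Int.mod a 1 < 1 := PySem.Int.mod_lt a (by norm_num)
  omega

lemma fd_neg_one (a : Int) : PySem.Int.floordiv a (-1) = -a := by
  have h := PySem.Int.floordiv_mul_add_mod a (-1)
  have h2 := PySem.Int.mod_neg_bounds a (b := -1) (by norm_num)
  omega

lemma canReach_exists (r c tr tc dr dc : Int) (hdr : dr = 1 ∨ dr = -1) (hdc : dc = 1 ∨ dc = -1) :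
    canReachA r c tr tc dr dc = true ↔ ∃ k : Int, 0 ≤ k ∧ tr = r + k * dr ∧ tc = c + k * dc := by
  rcases hdr with rfl | rfl <;> rcases hdc with rfl | rfl <;>
    simp only [canReachA, fd_one, fd_neg_one, Bool.and_eq_true, decide_eq_true_eq] <;>
    constructor
  · rintro ⟨⟨hk1, hk2⟩, hk3⟩; exact ⟨tr - r, by omega, by omega, by omega⟩
  · rintro ⟨k, hk, h2, h3⟩; omega
  · rintro ⟨⟨hk1, hk2⟩, hk3⟩; exact ⟨tr - r, by omega, by omega, by omega⟩
  · rintro ⟨k, hk, h2, h3⟩; omega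
  · rintro ⟨⟨hk1, hk2⟩, hk3⟩; exact ⟨r - tr, by omega, by omega, by omega⟩
  · rintro ⟨k, hk, h2, h3⟩; omega
  · rintro ⟨⟨hk1, hk2⟩, hk3⟩; exact ⟨r - tr, by omega, by omega, by omega⟩
  · rintro ⟨k, hk, h2, h3⟩; omega

lemma hitB_exists (tr tc r c dr dc : Int) (hdr : dr = 1 ∨ dr = -1) (hdc : dc = 1 ∨ dc = -1) :
    hitB tr tc (r, c, dr, dc) = true ↔ ∃ k : Int, 0 ≤ k ∧ tr = r + k * dr ∧ tc = c + k * dc := by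
  rcases hdr with rfl | rfl <;> rcases hdc with rfl | rfl <;>
    simp only [hitB, Bool.and_eq_true, decide_eq_true_eq] <;>
    constructor
  · rintro ⟨⟨hk1, hk2⟩, hk3⟩; exact ⟨tr - r, by omega, by omega, by omega⟩
  · rintro ⟨k, hk, h2, h3⟩; omega
  · rintro ⟨⟨hk1, hk2⟩, hk3⟩; exact ⟨tr - r, by omega, by omega, by omega⟩
  · rintro ⟨k, hk, h2, h3⟩; omega
  · rintro ⟨⟨hk1, hk2⟩, hk3⟩; exact ⟨r - tr, by omega, by omega, by omega⟩
  · rintro ⟨k, hk, h2, h3⟩; omega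
  · rintro ⟨⟨hk1, hk2⟩, hk3⟩; exact ⟨r - tr, by omega, by omega, by omega⟩
  · rintro ⟨k, hk, h2, h3⟩; omega

lemma hitB_eq_hitA (tr tc : Int) (s : Int × Int × Int × Int) (h : dirOK s) :
    hitB tr tc s = hitA tr tc s := by
  obtain ⟨r, c, dr, dc⟩ := s
  obtain ⟨hdr, hdc⟩ := h
  simp only at hdr hdc
  rw [Bool.eq_iff_iff, hitB_exists tr tc r c dr dc hdr hdc]
  exact (canReach_exists r c tr tc dr dc hdr hdc).symm

lemma stepB_eq_stA (R C : Int) (s : Int × Int × Int × Int) (h : dirOK s) :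
    stepB R C s = stA R C s := by
  obtain ⟨r, c, dr, dc⟩ := s
  obtain ⟨hdr, hdc⟩ := h
  simp only at hdr hdc
  rcases hdr with rfl | rfl <;> rcases hdc with rfl | rfl <;>
    simp only [stepB, stA, bounceA, nwall, Prod.mk.injEq] <;> norm_num <;>
    (try refine ⟨?_, ?_, ?_, ?_⟩) <;> (try split_ifs) <;> first | rfl | omega

lemma dirOK_stA (R C : Int) (s : Int × Int × Int × Int) (h : dirOK s) : dirOK (stA R C s) := by
  obtain ⟨r, c, dr, dc⟩ := s
  obtain ⟨hdr, hdc⟩ := h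
  simp only at hdr hdc
  rcases hdr with rfl | rfl <;> rcases hdc with rfl | rfl <;>
    simp only [stA, bounceA, nwall, dirOK] <;> split_ifs <;> simp

lemma dirOK_orb (R C : Int) (s : Int × Int × Int × Int) (h : dirOK s) (n : Nat) :
    dirOK (orb R C s n) := by
  induction n with
  | zero => exact h
  | succ n ih => rw [orb_succ]; exact dirOK_stA R C _ ih

-- wall-distance dynamics of one bounce
lemma stA_u (R C : Int) (s : Int × Int × Int × Int) (h : dirOK s) :
    nwall R (stA R C s).1 (stA R C s).2.2.1 =
      if nwall R s.1 s.2.2.1 ≤ nwall C s.2.1 s.2.2.2 then R - 1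
      else nwall R s.1 s.2.2.1 - nwall C s.2.1 s.2.2.2 := by
  obtain ⟨r, c, dr, dc⟩ := s
  obtain ⟨hdr, hdc⟩ := h
  simp only at hdr hdc
  rcases hdr with rfl | rfl <;> rcases hdc with rfl | rfl <;>
    simp only [stA, bounceA, nwall] <;> norm_num <;> split_ifs <;> omega

lemma stA_v (R C : Int) (s : Int × Int × Int × Int) (h : dirOK s) :
    nwall C (stA R C s).2.1 (stA R C s).2.2.2 =
      if nwall C s.2.1 s.2.2.2 ≤ nwall R s.1 s.2.2.1 then C - 1
      else nwall C s.2.1 s.2.2.2 - nwall R s.1 s.2.2.1 := by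
  obtain ⟨r, c, dr, dc⟩ := s
  obtain ⟨hdr, hdc⟩ := h
  simp only at hdr hdc
  rcases hdr with rfl | rfl <;> rcases hdc with rfl | rfl <;>
    simp only [stA, bounceA, nwall] <;> norm_num <;> split_ifs <;> omega

lemma uvOK_stA (R C K : Int) (hR : 1 ≤ R) (hC : 1 ≤ C) (hK1 : R - 1 ≤ K) (hK2 : C - 1 ≤ K)
    (s : Int × Int × Int × Int) (h : uvOK R C K s) : uvOK R C K (stA R C s) := by
  obtain ⟨hd, h1, h2, h3, h4⟩ := h
  have hu := stA_u R C s hd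
  have hv := stA_v R C s hd
  refine ⟨dirOK_stA R C s hd, ?_, ?_, ?_, ?_⟩
  · rw [hu]; split_ifs <;> omega
  · rw [hu]; split_ifs <;> omega
  · rw [hv]; split_ifs <;> omega
  · rw [hv]; split_ifs <;> omega

lemma uvOK_first (R C K : Int) (hR : 1 ≤ R) (hC : 1 ≤ C) (hK1 : R - 1 ≤ K) (hK2 : C - 1 ≤ K)
    (s : Int × Int × Int × Int) (hd : dirOK s)
    (hdiff1 : nwall R s.1 s.2.2.1 - nwall C s.2.1 s.2.2.2 ≤ K)
    (hdiff2 : nwall C s.2.1 s.2.2.2 - nwall R s.1 s.2.2.1 ≤ K) :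
    uvOK R C K (stA R C s) := by
  have hu := stA_u R C s hd
  have hv := stA_v R C s hd
  refine ⟨dirOK_stA R C s hd, ?_, ?_, ?_, ?_⟩
  · rw [hu]; split_ifs <;> omega
  · rw [hu]; split_ifs <;> omega
  · rw [hv]; split_ifs <;> omega
  · rw [hv]; split_ifs <;> omega

-- the box of states the orbit lives in, as a Finset
noncomputable def boxF (R C K : Int) : Finset (Int × Int × Int × Int) :=
  (Finset.Icc (R - 1 - K) K) ×ˢ (Finset.Icc (C - 1 - K) K) ×ˢ
    ({1, -1} : Finset Int) ×ˢ ({1, -1} : Finset Int)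

lemma mem_boxF (R C K : Int) (hK1 : R - 1 ≤ K) (hK2 : C - 1 ≤ K)
    (s : Int × Int × Int × Int) (h : uvOK R C K s) : s ∈ boxF R C K := by
  obtain ⟨r, c, dr, dc⟩ := s
  obtain ⟨⟨hdr, hdc⟩, h1, h2, h3, h4⟩ := h
  simp only at hdr hdc h1 h2 h3 h4
  simp only [boxF, Finset.mem_product, Finset.mem_Icc, Finset.mem_insert, Finset.mem_singleton]
  rcases hdr with rfl | rfl <;> rcases hdc with rfl | rfl <;>
    simp [nwall] at h1 h2 h3 h4 <;> refine ⟨by omega, by omega, by tauto, by tauto⟩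

lemma card_boxF (R C K : Int) (hR : 1 ≤ R) (hC : 1 ≤ C) (hK : 0 ≤ K) :
    (boxF R C K).card ≤ (2 * K + 2).toNat * (2 * K + 2).toNat * 4 := by
  have h1 : (boxF R C K).card =
      (K + 1 - (R - 1 - K)).toNat * ((K + 1 - (C - 1 - K)).toNat * 4) := by
    simp [boxF, Finset.card_product, Int.card_Icc]
  rw [h1]
  have h3 : (K + 1 - (R - 1 - K)).toNat ≤ (2 * K + 2).toNat := by omega
  have h4 : (K + 1 - (C - 1 - K)).toNat ≤ (2 * K + 2).toNat := by omega
  calc (K + 1 - (R - 1 - K)).toNat * ((K + 1 - (C - 1 - K)).toNat * 4)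
      ≤ (2 * K + 2).toNat * ((2 * K + 2).toNat * 4) := by
        exact Nat.mul_le_mul h3 (Nat.mul_le_mul_right _ h4)
    _ = (2 * K + 2).toNat * (2 * K + 2).toNat * 4 := by ring

-- orbit periodicity machinery
lemma orb_period (R C : Int) (s : Int × Int × Int × Int) (a p : Nat)
    (h : orb R C s a = orb R C s (a + p)) :
    ∀ i, a ≤ i → orb R C s i = orb R C s (i + p) := by
  intro i hi
  obtain ⟨k, rfl⟩ : ∃ k, i = a + k := ⟨i - a, by omega⟩
  clear hi
  induction k with
  | zero => exact h
  | succ k ih =>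
    rw [show a + (k + 1) = (a + k) + 1 from by omega, orb_succ, ih, ← orb_succ,
      show a + k + p + 1 = a + k + 1 + p from by omega]

lemma orb_mul_period (R C : Int) (s : Int × Int × Int × Int) (a p : Nat)
    (h : orb R C s a = orb R C s (a + p)) :
    ∀ k i, a ≤ i → orb R C s i = orb R C s (i + k * p) := by
  intro k
  induction k with
  | zero => intro i _; simp
  | succ k ih =>
    intro i hi
    have h1 := ih i hi
    have h2 := orb_period R C s a p h (i + k * p) (by omega)
    rw [h1, h2]
    ring_nf

lemma orb_cover (R C : Int) (s : Int × Int × Int × Int) (m t : Nat) (ht : 1 ≤ t)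
    (h : orb R C s m = orb R C s (m + t)) :
    ∀ i, ∃ i', i' < m + t ∧ orb R C s i = orb R C s i' := by
  intro i
  induction i using Nat.strong_induction_on with
  | _ i ih =>
    by_cases hlt : i < m + t
    · exact ⟨i, hlt, rfl⟩
    · obtain ⟨i', hi', he⟩ := ih (i - t) (by omega)
      refine ⟨i', hi', ?_⟩
      have h3 := orb_period R C s m t h (i - t) (by omega)
      rw [show i - t + t = i from by omega] at h3
      rw [← h3]
      exact he

lemma loopA_succ (R C tr tc : Int) (f : Nat) (r c dr dc res : Int)
    (seen : PySem.Set (Int × Int × Int × Int)) :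
    loopA R C tr tc (f + 1) r c dr dc res seen =
      if canReachA r c tr tc dr dc then some res
      else
        let s := bounceA R C r c dr dc
        if s ∈ seen then some (-1)
        else loopA R C tr tc f s.1 s.2.1 s.2.2.1 s.2.2.2 (res + 1) (PySem.Set.add seen s) := rfl

lemma add_of_not_mem {α : Type} [BEq α] [LawfulBEq α] (s : PySem.Set α) (x : α) (h : x ∉ s) :
    PySem.Set.add s x = s ++ [x] := by
  simp [PySem.Set.add, PySem.Set.contains, h]

lemma seen_len_le_box (R C K : Int) (hK1 : R - 1 ≤ K) (hK2 : C - 1 ≤ K)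
    (seen : List (Int × Int × Int × Int)) (hnd : seen.Nodup)
    (hok : ∀ x ∈ seen, uvOK R C K x) : seen.length ≤ (boxF R C K).card := by
  classical
  have hsub : seen.toFinset ⊆ boxF R C K := by
    intro x hx
    exact mem_boxF R C K hK1 hK2 x (hok x (List.mem_toFinset.mp hx))
  have h1 : seen.toFinset.card = seen.length := List.toFinset_card_of_nodup hnd
  have h2 := Finset.card_le_card hsub
  omega

lemma loopA_term (R C tr tc K : Int) (hR : 1 ≤ R) (hC : 1 ≤ C) (hK1 : R - 1 ≤ K)
    (hK2 : C - 1 ≤ K) :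
    ∀ (f : Nat) (s : Int × Int × Int × Int) (res : Int)
      (seen : PySem.Set (Int × Int × Int × Int)),
      uvOK R C K s → seen.Nodup → (∀ x ∈ seen, uvOK R C K x) →
      (boxF R C K).card < f + seen.length →
      (loopA R C tr tc f s.1 s.2.1 s.2.2.1 s.2.2.2 res seen).isSome := by
  intro f
  induction f with
  | zero =>
    intro s res seen hok0 hnd hok hlt
    exfalso
    have := seen_len_le_box R C K hK1 hK2 seen hnd hok
    omega
  | succ f ih =>
    intro s res seen hok0 hnd hok hlt
    simp only [loopA_succ]
    split
    · simp
    · split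
      · simp
      · rename_i hcr hmem
        have hst : bounceA R C s.1 s.2.1 s.2.2.1 s.2.2.2 = stA R C s := rfl
        rw [hst] at hmem ⊢
        have hok1 : uvOK R C K (stA R C s) :=
          uvOK_stA R C K hR hC hK1 hK2 s hok0
        apply ih
        · exact hok1
        · rw [add_of_not_mem seen _ hmem]
          simp only [List.nodup_append, List.nodup_cons, List.nodup_nil]
          refine ⟨hnd, by simp, ?_⟩
          intro a a1 a2 b hmem2
          simp at b
          exact hmem (b ▸ hmem2 ▸ a1)
        · intro x hx
          rw [add_of_not_mem seen _ hmem] at hx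
          simp at hx
          rcases hx with hx | rfl
          · exact hok x hx
          · exact hok1
        · rw [add_of_not_mem seen _ hmem]
          simp
          omega

lemma repeat_exists (R C K : Int) (s0 : Int × Int × Int × Int)
    (hR : 1 ≤ R) (hC : 1 ≤ C) (hK1 : R - 1 ≤ K) (hK2 : C - 1 ≤ K)
    (hfirst : uvOK R C K (stA R C s0)) :
    ∃ a p : Nat, 1 ≤ a ∧ 1 ≤ p ∧ a ≤ (boxF R C K).card + 1 ∧ p ≤ (boxF R C K).card ∧
      orb R C s0 a = orb R C s0 (a + p) := by
  classical
  have horb : ∀ n : Nat, uvOK R C K (orb R C s0 (n + 1)) := by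
    intro n
    induction n with
    | zero => exact hfirst
    | succ n ih => rw [orb_succ]; exact uvOK_stA R C K hR hC hK1 hK2 _ ih
  set N := (boxF R C K).card with hN
  have hmaps : ∀ k ∈ Finset.range (N + 1), orb R C s0 (k + 1) ∈ boxF R C K := by
    intro k _
    exact mem_boxF R C K hK1 hK2 _ (horb k)
  have hcard : (boxF R C K).card < (Finset.range (N + 1)).card := by
    simp [hN]
  obtain ⟨i, hi, j, hj, hne, he⟩ :=
    Finset.exists_ne_map_eq_of_card_lt_of_maps_to hcard hmaps
  simp only [Finset.mem_range] at hi hj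
  rcases Nat.lt_or_ge i j with hlt | hge
  · exact ⟨i + 1, j - i, by omega, by omega, by omega, by omega, by
      rw [he, show i + 1 + (j - i) = j + 1 from by omega]⟩
  · have hlt2 : j < i := by omega
    exact ⟨j + 1, i - j, by omega, by omega, by omega, by omega, by
      rw [← he, show j + 1 + (i - j) = i + 1 from by omega]⟩

lemma floydB_char (R C : Int) (s0 : Int × Int × Int × Int) (hd0 : dirOK s0) :
    ∀ (f t : Nat), 1 ≤ t →
      (∃ t', t ≤ t' ∧ t' < t + f ∧ orb R C s0 t' = orb R C s0 (2 * t')) →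
      ∃ t0, floydB R C f t (orb R C s0 t) (orb R C s0 (2 * t)) = some (t0, orb R C s0 t0) ∧
        1 ≤ t0 ∧ (∀ t', t ≤ t' → orb R C s0 t' = orb R C s0 (2 * t') → t0 ≤ t') ∧
        orb R C s0 t0 = orb R C s0 (2 * t0) := by
  intro f
  induction f with
  | zero =>
    intro t _ hw
    exfalso; obtain ⟨t', h1, h2, _⟩ := hw; omega
  | succ f ih =>
    intro t ht hw
    by_cases he : orb R C s0 t = orb R C s0 (2 * t)
    · refine ⟨t, ?_, ht, fun t' h1 _ => h1, he⟩
      simp only [floydB, if_pos he]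
    · have h1 : stepB R C (orb R C s0 t) = orb R C s0 (t + 1) := by
        rw [stepB_eq_stA R C _ (dirOK_orb R C s0 hd0 t), ← orb_succ]
      have h2 : stepB R C (stepB R C (orb R C s0 (2 * t))) = orb R C s0 (2 * (t + 1)) := by
        rw [stepB_eq_stA R C _ (dirOK_orb R C s0 hd0 _), ← orb_succ,
          stepB_eq_stA R C _ (dirOK_orb R C s0 hd0 _), ← orb_succ,
          show 2 * t + 1 + 1 = 2 * (t + 1) from by omega]
      obtain ⟨t', hw1, hw2, hw3⟩ := hw
      have hne : t' ≠ t := fun h => he (h ▸ hw3)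
      obtain ⟨t0, hf, ht0, hmin, hp⟩ := ih (t + 1) (by omega) ⟨t', by omega, by omega, hw3⟩
      refine ⟨t0, ?_, ht0, ?_, hp⟩
      · simp only [floydB, if_neg he]
        rw [h1, h2]
        exact hf
      · intro t'' h1' h2'
        have : t'' ≠ t := fun h => he (h ▸ h2')
        exact hmin t'' (by omega) h2'

lemma muB_char (R C : Int) (s0 : Int × Int × Int × Int) (hd0 : dirOK s0) (T : Nat) :
    ∀ (f m : Nat),
      (∃ m', m ≤ m' ∧ m' < m + f ∧ orb R C s0 m' = orb R C s0 (m' + T)) →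
      ∃ m0, muB R C f m (orb R C s0 m) (orb R C s0 (m + T)) = some m0 ∧
        orb R C s0 m0 = orb R C s0 (m0 + T) := by
  intro f
  induction f with
  | zero =>
    intro m hw
    exfalso; obtain ⟨m', h1, h2, _⟩ := hw; omega
  | succ f ih =>
    intro m hw
    by_cases he : orb R C s0 m = orb R C s0 (m + T)
    · exact ⟨m, by simp only [muB, if_pos he], he⟩
    · have h1 : stepB R C (orb R C s0 m) = orb R C s0 (m + 1) := by
        rw [stepB_eq_stA R C _ (dirOK_orb R C s0 hd0 m), ← orb_succ]
      have h2 : stepB R C (orb R C s0 (m + T)) = orb R C s0 (m + 1 + T) := by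
        rw [stepB_eq_stA R C _ (dirOK_orb R C s0 hd0 _), ← orb_succ,
          show m + T + 1 = m + 1 + T from by omega]
      obtain ⟨m', hw1, hw2, hw3⟩ := hw
      have hne : m' ≠ m := fun h => he (h ▸ hw3)
      obtain ⟨m0, hf, hp⟩ := ih (m + 1) ⟨m', by omega, by omega, hw3⟩
      refine ⟨m0, ?_, hp⟩
      simp only [muB, if_neg he]
      rw [h1, h2]
      exact hf

lemma scanB_none (R C tr tc : Int) (s0 : Int × Int × Int × Int) (hd0 : dirOK s0) :
    ∀ (k i : Nat), (∀ j, i ≤ j → j < i + k → hitA tr tc (orb R C s0 j) = false) →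
      scanB R C tr tc k (i : Int) (orb R C s0 i) = -1 := by
  intro k
  induction k with
  | zero => intro i _; simp [scanB]
  | succ k ih =>
    intro i hno
    have hh : hitB tr tc (orb R C s0 i) = false := by
      rw [hitB_eq_hitA tr tc _ (dirOK_orb R C s0 hd0 i)]
      exact hno i (le_refl i) (by omega)
    simp only [scanB, hh, Bool.false_eq_true, if_false]
    have hs : stepB R C (orb R C s0 i) = orb R C s0 (i + 1) := by
      rw [stepB_eq_stA R C _ (dirOK_orb R C s0 hd0 i), ← orb_succ]
    rw [hs, show (i : Int) + 1 = ((i + 1 : Nat) : Int) from by push_cast; ring]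
    exact ih (i + 1) (fun j h1 h2 => hno j (by omega) (by omega))

lemma scanB_hit (R C tr tc : Int) (s0 : Int × Int × Int × Int) (hd0 : dirOK s0) :
    ∀ (k i j : Nat), i ≤ j → j < i + k → hitA tr tc (orb R C s0 j) = true →
      (∀ j', j' < j → hitA tr tc (orb R C s0 j') = false) →
      scanB R C tr tc k (i : Int) (orb R C s0 i) = (j : Int) := by
  intro k
  induction k with
  | zero => intro i j h1 h2 _ _; omega
  | succ k ih =>
    intro i j h1 h2 hhit hmin
    by_cases hij : i = j
    · subst hij
      have hh : hitB tr tc (orb R C s0 i) = true := by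
        rw [hitB_eq_hitA tr tc _ (dirOK_orb R C s0 hd0 i)]; exact hhit
      simp only [scanB, hh, if_true]
    · have hh : hitB tr tc (orb R C s0 i) = false := by
        rw [hitB_eq_hitA tr tc _ (dirOK_orb R C s0 hd0 i)]
        exact hmin i (by omega)
      simp only [scanB, hh, Bool.false_eq_true, if_false]
      have hs : stepB R C (orb R C s0 i) = orb R C s0 (i + 1) := by
        rw [stepB_eq_stA R C _ (dirOK_orb R C s0 hd0 i), ← orb_succ]
      rw [hs, show (i : Int) + 1 = ((i + 1 : Nat) : Int) from by push_cast; ring]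
      exact ih (i + 1) j (by omega) (by omega) hhit hmin

lemma loopA_char (R C tr tc : Int) (s0 : Int × Int × Int × Int) (hd0 : dirOK s0) :
    ∀ (f t : Nat) (v : Int) (seen : PySem.Set (Int × Int × Int × Int)),
      (∀ i, i < t → hitA tr tc (orb R C s0 i) = false) →
      (∀ x ∈ seen, ∃ j, 1 ≤ j ∧ j ≤ t ∧ x = orb R C s0 j) →
      loopA R C tr tc f (orb R C s0 t).1 (orb R C s0 t).2.1 (orb R C s0 t).2.2.1
        (orb R C s0 t).2.2.2 (t : Int) seen = some v →
      (v = -1 ∧ ∀ i, hitA tr tc (orb R C s0 i) = false) ∨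
      (∃ j : Nat, v = (j : Int) ∧ hitA tr tc (orb R C s0 j) = true ∧
        ∀ i, i < j → hitA tr tc (orb R C s0 i) = false) := by
  intro f
  induction f with
  | zero => intro t v seen _ _ h; simp [loopA] at h
  | succ f ih =>
    intro t v seen hnohit hseen h
    rw [loopA_succ] at h
    have hbs : bounceA R C (orb R C s0 t).1 (orb R C s0 t).2.1 (orb R C s0 t).2.2.1
        (orb R C s0 t).2.2.2 = orb R C s0 (t + 1) := by
      rw [orb_succ]; rfl
    by_cases hcr : canReachA (orb R C s0 t).1 (orb R C s0 t).2.1 tr tc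
        (orb R C s0 t).2.2.1 (orb R C s0 t).2.2.2 = true
    · rw [if_pos hcr] at h
      right
      exact ⟨t, (Option.some.inj h).symm, hcr, hnohit⟩
    · rw [if_neg hcr] at h
      simp only [hbs] at h
      have hft : hitA tr tc (orb R C s0 t) = false := by
        simpa [hitA] using Bool.eq_false_iff.mpr hcr
      by_cases hmem : orb R C s0 (t + 1) ∈ seen
      · rw [if_pos hmem] at h
        left
        refine ⟨(Option.some.inj h).symm, ?_⟩
        obtain ⟨j, hj1, hj2, hje⟩ := hseen _ hmem
        have hper : orb R C s0 j = orb R C s0 (j + (t + 1 - j)) := by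
          rw [show j + (t + 1 - j) = t + 1 from by omega]; exact hje.symm
        intro i
        obtain ⟨i', hi', he⟩ := orb_cover R C s0 j (t + 1 - j) (by omega) hper i
        rw [he]
        rcases Nat.lt_or_ge i' t with hx | hx
        · exact hnohit i' hx
        · have : i' = t := by omega
          rw [this]; exact hft
      · rw [if_neg hmem] at h
        have hcast : (t : Int) + 1 = ((t + 1 : Nat) : Int) := by push_cast; ring
        rw [hcast] at h
        apply ih (t + 1) v (PySem.Set.add seen (orb R C s0 (t + 1)))
        · intro i hi
          rcases Nat.lt_or_ge i t with hx | hx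
          · exact hnohit i hx
          · have : i = t := by omega
            rw [this]; exact hft
        · intro x hx
          rw [add_of_not_mem seen _ hmem] at hx
          simp at hx
          rcases hx with hx | rfl
          · obtain ⟨j, hj1, hj2, hje⟩ := hseen x hx
            exact ⟨j, hj1, by omega, hje⟩
          · exact ⟨t + 1, by omega, le_refl _, rfl⟩
        · exact h

lemma loopA_start (R C tr tc K : Int) (hR : 1 ≤ R) (hC : 1 ≤ C) (hK1 : R - 1 ≤ K)
    (hK2 : C - 1 ≤ K) (s0 : Int × Int × Int × Int)
    (hfirst : uvOK R C K (stA R C s0)) (f : Nat) (hf : (boxF R C K).card + 1 < f) :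
    (loopA R C tr tc f s0.1 s0.2.1 s0.2.2.1 s0.2.2.2 0 PySem.Set.empty).isSome := by
  obtain ⟨f', rfl⟩ : ∃ f', f = f' + 1 := ⟨f - 1, by omega⟩
  simp only [loopA_succ]
  split
  · simp
  · split
    · simp
    · rename_i hcr hmem
      have hst : bounceA R C s0.1 s0.2.1 s0.2.2.1 s0.2.2.2 = stA R C s0 := rfl
      rw [hst] at hmem ⊢
      rw [add_of_not_mem _ _ hmem]
      have hemp : (PySem.Set.empty : PySem.Set (Int × Int × Int × Int)) ++ [stA R C s0] =
          [stA R C s0] := rfl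
      rw [hemp]
      apply loopA_term R C tr tc K hR hC hK1 hK2 f' (stA R C s0) 1 [stA R C s0] hfirst
      · simp
      · intro x hx; simp at hx; rw [hx]; exact hfirst
      · simp; omega

lemma orb_one (R C : Int) (s0 : Int × Int × Int × Int) : orb R C s0 1 = stA R C s0 := by
  rw [orb_succ, orb_zero]

lemma main_eq (R C r1 c1 r2 c2 : Int) (d : String) (dr dc : Int)
    (hd : pyDIR.get? d = some (dr, dc)) (hR : 1 ≤ R) (hC : 1 ≤ C)
    (hdr : dr = 1 ∨ dr = -1) (hdc : dc = 1 ∨ dc = -1) :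
    solve R C r1 c1 r2 c2 d = solve_alt R C r1 c1 r2 c2 d := by
  unfold solve solve_alt
  rw [hd]
  dsimp only
  set s0 : Int × Int × Int × Int := (r1 - 1, c1 - 1, dr, dc) with hs0
  have hd0 : dirOK s0 := ⟨hdr, hdc⟩
  set kn : Nat := (nwall R (r1 - 1) dr).natAbs + (nwall C (c1 - 1) dc).natAbs +
    R.natAbs + C.natAbs + 2 with hkn
  set K : Int := (kn : Int) with hK
  have hK1 : R - 1 ≤ K := by omega
  have hK2 : C - 1 ≤ K := by omega
  have hK0 : 0 ≤ K := by omega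
  have hKd1 : nwall R s0.1 s0.2.2.1 - nwall C s0.2.1 s0.2.2.2 ≤ K := by
    show nwall R (r1 - 1) dr - nwall C (c1 - 1) dc ≤ K
    omega
  have hKd2 : nwall C s0.2.1 s0.2.2.2 - nwall R s0.1 s0.2.2.1 ≤ K := by
    show nwall C (c1 - 1) dc - nwall R (r1 - 1) dr ≤ K
    omega
  have hfirst : uvOK R C K (stA R C s0) :=
    uvOK_first R C K hR hC hK1 hK2 s0 hd0 hKd1 hKd2
  have hfb : fuelBox R C (r1 - 1) (c1 - 1) dr dc = (2 * kn + 2) * (2 * kn + 2) * 4 + 2 := rfl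
  set B0 : Nat := fuelBox R C (r1 - 1) (c1 - 1) dr dc with hB0
  set N : Nat := (boxF R C K).card with hN
  have hNb : N ≤ (2 * kn + 2) * (2 * kn + 2) * 4 := by
    have h1 := card_boxF R C K hR hC hK0
    have h2 : (2 * K + 2).toNat = 2 * kn + 2 := by omega
    rw [h2] at h1
    exact h1
  have hNB0 : N + 2 ≤ B0 := by omega
  -- ===== A side =====
  have hsomeA := loopA_start R C (r2 - 1) (c2 - 1) K hR hC hK1 hK2 s0 hfirst (B0 + 2)
    (by omega)
  obtain ⟨v, hv⟩ := Option.isSome_iff_exists.mp hsomeA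
  have hchar := loopA_char R C (r2 - 1) (c2 - 1) s0 hd0 (B0 + 2) 0 v PySem.Set.empty
    (by omega) (by intro x hx; simp [PySem.Set.empty] at hx) hv
  rw [show (loopA R C (r2 - 1) (c2 - 1) (B0 + 2) (r1 - 1) (c1 - 1) dr dc 0
      PySem.Set.empty) = some v from hv]
  -- ===== B side =====
  obtain ⟨a, p, ha1, hp1, ha2, hp2, hap⟩ :=
    repeat_exists R C K s0 hR hC hK1 hK2 hfirst
  set ts : Nat := p * (a + 1) with hts
  have hmeet : orb R C s0 ts = orb R C s0 (2 * ts) := by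
    have := orb_mul_period R C s0 a p hap (a + 1) ts (by nlinarith [hp1, ha1])
    rw [this, show ts + (a + 1) * p = 2 * ts from by rw [hts]; ring]
  set FB : Nat := (B0 + 2) * (B0 + 2) + 2 with hFB
  have htsb : ts < FB := by
    have h1 : p ≤ N := hp2
    have h2 : a + 1 ≤ N + 2 := by omega
    have h3 : ts ≤ N * (N + 2) := Nat.mul_le_mul h1 h2
    have h4 : N * (N + 2) < (B0 + 2) * (B0 + 2) := by
      apply Nat.mul_lt_mul_of_lt_of_le (by omega) (by omega)
      omega
    omega
  have hts1 : 1 ≤ ts := by nlinarith [hp1, ha1]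
  obtain ⟨t0, hfeq, ht01, hmin, hper⟩ := floydB_char R C s0 hd0 FB 1 (le_refl 1)
    ⟨ts, hts1, by omega, hmeet⟩
  have ht0ts : t0 ≤ ts := hmin ts hts1 hmeet
  have hstep1 : stepB R C s0 = orb R C s0 1 := by
    rw [stepB_eq_stA R C s0 hd0, orb_one]
  have hstep2 : stepB R C (stepB R C s0) = orb R C s0 (2 * 1) := by
    rw [hstep1, stepB_eq_stA R C _ (dirOK_orb R C s0 hd0 1), ← orb_succ]
  rw [hstep2, hstep1, hfeq]
  dsimp only
  obtain ⟨m0, hmeq, hmper⟩ := muB_char R C s0 hd0 t0 FB 0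
    ⟨t0, by omega, by omega, by
      rw [show t0 + t0 = 2 * t0 from by omega]; exact hper⟩
  rw [orb_zero, show (0 : Nat) + t0 = t0 from by omega] at hmeq
  rw [hmeq]
  dsimp only
  -- ===== both sides meet at the scan =====
  rcases hchar with ⟨rfl, hnone⟩ | ⟨j, rfl, hhit, hminj⟩
  · rw [Option.getD_some]
    exact (scanB_none R C (r2 - 1) (c2 - 1) s0 hd0 (m0 + t0) 0
      (fun j _ _ => hnone j)).symm
  · rw [Option.getD_some]
    have hjlt : j < m0 + t0 := by
      obtain ⟨i', hi', he⟩ := orb_cover R C s0 m0 t0 (by omega) hmper j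
      have hhit' : hitA (r2 - 1) (c2 - 1) (orb R C s0 i') = true := he ▸ hhit
      rcases Nat.lt_or_ge i' j with hx | hx
      · exact absurd hhit' (by rw [hminj i' hx]; simp)
      · omega
    exact (scanB_hit R C (r2 - 1) (c2 - 1) s0 hd0 (m0 + t0) 0 j (by omega)
      (by omega) hhit hminj).symm

lemma dir_DR : pyDIR.get? "DR" = some (1, 1) := by decide
lemma dir_DL : pyDIR.get? "DL" = some (1, -1) := by decide
lemma dir_UR : pyDIR.get? "UR" = some (-1, 1) := by decide
lemma dir_UL : pyDIR.get? "UL" = some (-1, -1) := by decide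

-- ===== VERDICT (by name: the statement is the Claim_ definition above) =====
theorem solve_spec : Claim_equal_solve := by
  intro R C r1 c1 r2 c2 d hdom hpre
  obtain ⟨hd, hR, hC⟩ := hpre
  unfold Spec_solve
  rcases hd with rfl | rfl | rfl | rfl
  · exact main_eq R C r1 c1 r2 c2 "DR" 1 1 dir_DR hR hC (Or.inl rfl) (Or.inl rfl)
  · exact main_eq R C r1 c1 r2 c2 "DL" 1 (-1) dir_DL hR hC (Or.inl rfl) (Or.inr rfl)
  · exact main_eq R C r1 c1 r2 c2 "UR" (-1) 1 dir_UR hR hC (Or.inr rfl) (Or.inl rfl)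
  · exact main_eq R C r1 c1 r2 c2 "UL" (-1) (-1) dir_UL hR hC (Or.inr rfl) (Or.inr rfl)
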